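-- pv_equiv track=rewrite | github.com/4centto/SchoolWork | MacClusky/program.py | combinar
-- ===== SOURCE A (Python) =====
-- def combinar(a, b):
--     diferencia = 0
--     nuevo = ""
--     for x in range(len(a)):
--         if a[x] != b[x]:
--             diferencia += 1
--             nuevo += "*"
--         else:
--             nuevo += a[x]
--     if diferencia == 1:
--         return nuevo
--     else:
--         return None
-- ===== SOURCE B (Python) =====
-- def combinar(a, b):
--     diffs = [i for i in range(len(a)) if a[i] != b[i]]
--     if len(diffs) == 1:
--         idx = diffs[0]
--         return a[:idx] + '*' + a[idx + 1:]
--     return None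
-- ===== Notes on version B (the rewrite author's own statement) =====
-- stated objective: simpler
-- what changed: B first collects the set of mismatch indices with one comprehension and, when there is exactly one, builds the result by slicing around it, instead of A's char-by-char accumulation of both a difference counter and the output string.
import Mathlib
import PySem

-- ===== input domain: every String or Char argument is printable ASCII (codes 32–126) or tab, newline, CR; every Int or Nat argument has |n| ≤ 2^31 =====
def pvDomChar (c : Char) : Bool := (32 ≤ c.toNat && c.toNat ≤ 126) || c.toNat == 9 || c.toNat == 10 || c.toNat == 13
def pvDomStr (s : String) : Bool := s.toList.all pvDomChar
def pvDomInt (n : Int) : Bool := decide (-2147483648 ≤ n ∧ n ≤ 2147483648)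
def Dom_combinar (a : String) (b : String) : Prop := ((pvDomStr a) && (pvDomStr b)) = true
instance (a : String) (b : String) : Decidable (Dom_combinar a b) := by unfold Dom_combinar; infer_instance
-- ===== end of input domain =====

-- B replaces A's char-by-char accumulation (counter + output string) by collecting the
-- mismatch indices first and slicing around the single one; objective: simpler.

-- ===== PORT A =====
-- loop body of A: a[x]/b[x] read via getD; under Pre_combinar every index is in range, exact there
def pvStepA (la lb : List Char) (st : Int × List Char) (x : Nat) : Int × List Char :=
  if la.getD x ' ' ≠ lb.getD x ' ' then (st.1 + 1, st.2 ++ ['*'])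
  else (st.1, st.2 ++ [la.getD x ' '])

def combinar (a : String) (b : String) : Option String :=
  let la := a.toList
  let lb := b.toList
  let r := (List.range la.length).foldl (pvStepA la lb) (0, [])
  if r.1 = 1 then some (String.ofList r.2) else none

-- ===== PORT B =====
def combinar_alt (a : String) (b : String) : Option String :=
  let la := a.toList
  let lb := b.toList
  let diffs := (List.range la.length).filter (fun i => la.getD i ' ' ≠ lb.getD i ' ')
  match diffs with
  | [i] => some (String.ofList (la.take i ++ '*' :: la.drop (i + 1)))
  | _ => none

-- ===== PRECONDITION & SPEC =====
-- Pre_ excludes len(b) < len(a): there Python A (and B) raise IndexError reading b[x]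
def Pre_combinar (a : String) (b : String) : Prop := a.toList.length ≤ b.toList.length
instance (a : String) (b : String) : Decidable (Pre_combinar a b) := by unfold Pre_combinar; infer_instance

def pvWitness_combinar : String × String := ("cat", "cut")

def Spec_combinar (a : String) (b : String) (out : Option String) : Prop := out = combinar_alt a b
instance (a : String) (b : String) (out : Option String) : Decidable (Spec_combinar a b out) := by unfold Spec_combinar; infer_instance

-- ===== CLAIM (what is proved, stated in full; the proofs are below) =====
def Claim_equal_combinar : Prop := ∀ (a : String) (b : String), Dom_combinar a b → Pre_combinar a b → Spec_combinar a b (combinar a b)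

-- ===== LEMMAS AND PROOFS =====

theorem pv_foldl_step (la lb : List Char) (n : Nat) (d : Int) (s : List Char) :
    (List.range n).foldl (pvStepA la lb) (d, s) =
      (d + ((List.range n).filter (fun i => la.getD i ' ' ≠ lb.getD i ' ')).length,
       s ++ (List.range n).map
         (fun i => if la.getD i ' ' ≠ lb.getD i ' ' then '*' else la.getD i ' ')) := by
  induction n with
  | zero => simp
  | succ n ih =>
      rw [List.range_succ, List.foldl_append, ih]
      simp only [List.foldl_cons, List.foldl_nil, pvStepA, List.filter_append, List.map_append]
      by_cases h : la[n]?.getD ' ' = lb[n]?.getD ' '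
      · simp [h]
      · simp [h, add_assoc]

theorem pv_map_of_single (la lb : List Char) (i : Nat)
    (h : (List.range la.length).filter (fun i => la.getD i ' ' ≠ lb.getD i ' ') = [i]) :
    (List.range la.length).map
        (fun j => if la.getD j ' ' ≠ lb.getD j ' ' then '*' else la.getD j ' ')
      = la.take i ++ '*' :: la.drop (i + 1) := by
  have hi : i ∈ (List.range la.length).filter (fun i => la.getD i ' ' ≠ lb.getD i ' ') := by
    rw [h]; exact List.mem_singleton.mpr rfl
  have hiR := List.mem_filter.mp hi
  have hilt : i < la.length := List.mem_range.mp hiR.1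
  have honly : ∀ j, j < la.length → j ≠ i → la.getD j ' ' = lb.getD j ' ' := by
    intro j hj hne
    by_contra hd
    have hmem : j ∈ (List.range la.length).filter
        (fun i => la.getD i ' ' ≠ lb.getD i ' ') :=
      List.mem_filter.mpr ⟨List.mem_range.mpr hj, by simpa using hd⟩
    rw [h] at hmem
    exact hne (List.mem_singleton.mp hmem)
  have hset : (List.range la.length).map
      (fun j => if la.getD j ' ' ≠ lb.getD j ' ' then '*' else la.getD j ' ') = la.set i '*' := by
    apply List.ext_getElem
    · simp
    · intro j hj1 hj2
      have hjn : j < la.length := by simpa using hj1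
      rw [List.getElem_map, List.getElem_range, List.getElem_set]
      by_cases hji : i = j
      · subst hji
        rw [if_pos (show la.getD i ' ' ≠ lb.getD i ' ' from by simpa using hiR.2), if_pos rfl]
      · have heqc : la.getD j ' ' = lb.getD j ' ' := honly j hjn (fun e => hji e.symm)
        rw [if_neg hji, if_neg (by simpa using heqc)]
        simp [List.getD_eq_getElem?_getD, hjn]
  rw [hset]
  exact List.set_eq_take_cons_drop '*' hilt

theorem pv_core (a b : String) : combinar a b = combinar_alt a b := by
  simp only [combinar, combinar_alt]
  rw [pv_foldl_step]
  simp only [List.nil_append, Int.zero_add]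
  rcases hd : (List.range a.toList.length).filter
      (fun i => a.toList.getD i ' ' ≠ b.toList.getD i ' ') with _ | ⟨i, _ | ⟨y, t⟩⟩
  · simp
  · rw [if_pos (by norm_num), pv_map_of_single a.toList b.toList i hd]
  · rw [if_neg (by simp; omega)]

-- ===== VERDICT (by name: the statement is the Claim_ definition above) =====
theorem combinar_spec : Claim_equal_combinar := by
  intro a b _ _
  unfold Spec_combinar
  exact pv_core a b
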